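-- pv_equiv track=rewrite | github.com/VoGPro/pythonLabs | Lab4/Task1/task1.py | findMinSumOf3Nums
-- ===== SOURCE A (Python) =====
-- def findMinSumOf3Nums(n, k, numbers):
--     min_sum = float('inf')
--     final_nums = []
--     for i in range(n - 2*k):
--         for j in range(i + k, n - k):
--             for q in range(j + k, n):
--                 current_sum = numbers[i] + numbers[j] + numbers[q]
--                 if current_sum < min_sum:
--                     min_sum = current_sum
--                     final_nums = [numbers[i], numbers[j], numbers[q]]
--     return final_nums
-- ===== SOURCE B (Python) =====
-- def findMinSumOf3Nums(n, k, numbers):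
--     # Single backward pass over i, keeping for the current i:
--     #   mq   = leftmost-minimal numbers[q] over q in [i+2k, n)
--     #   mp   = lex-first minimal (numbers[j]+q_best, numbers[j], q_best) over j in [i+k, n-k)
--     #   best = lex-first minimal triple over i' in [i, n-2k)
--     if n - 2*k <= 0:
--         return []
--     best = None
--     mq = None
--     mp = None
--     for i in range(n - 2*k - 1, -1, -1):
--         v = numbers[i + 2*k]
--         if mq is None or v <= mq:
--             mq = v
--         jv = numbers[i + k]
--         if mp is None or jv + mq <= mp[0]:
--             mp = (jv + mq, jv, mq)
--         iv = numbers[i]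
--         if best is None or iv + mp[0] <= best[0]:
--             best = (iv + mp[0], [iv, mp[1], mp[2]])
--     return best[1]
-- ===== Notes on version B (the rewrite author's own statement) =====
-- stated objective: alternative
-- what changed: Replaces A's triple nested loop over (i,j,q) with a single backward pass over i that maintains the leftmost-minimal q-value, the lex-first minimal (j,q) pair, and the lex-first minimal (i,j,q) triple as running state.
import Mathlib
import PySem

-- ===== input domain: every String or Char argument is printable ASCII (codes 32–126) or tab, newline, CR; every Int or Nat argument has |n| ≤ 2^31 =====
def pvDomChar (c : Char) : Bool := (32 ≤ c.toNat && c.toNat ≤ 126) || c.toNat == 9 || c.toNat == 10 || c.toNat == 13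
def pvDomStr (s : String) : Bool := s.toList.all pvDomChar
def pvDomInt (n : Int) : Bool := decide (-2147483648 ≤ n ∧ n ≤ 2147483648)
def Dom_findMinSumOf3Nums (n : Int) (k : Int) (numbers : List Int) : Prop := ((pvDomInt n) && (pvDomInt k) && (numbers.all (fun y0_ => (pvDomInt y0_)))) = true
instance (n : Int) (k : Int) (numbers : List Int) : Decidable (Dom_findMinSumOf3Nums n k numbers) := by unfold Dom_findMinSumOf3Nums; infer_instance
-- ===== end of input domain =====

-- B replaces A's triple nested loop by a single backward pass over i that keeps the running
-- leftmost-minimal q-value, (j,q)-pair and (i,j,q)-triple; return values proved equal.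

-- ===== PORT A =====
-- numbers[t]: Python indexing via pyGetD; Pre_ guarantees every access is in range
-- (valid also as a negative wraparound index), so the default 0 is never used there.
def findMinSumOf3Nums (n : Int) (k : Int) (numbers : List Int) : List Int :=
  ((PySem.List.pyRange 0 (n - 2*k) 1).foldl (fun st i =>
    (PySem.List.pyRange (i + k) (n - k) 1).foldl (fun st j =>
      (PySem.List.pyRange (j + k) n 1).foldl (fun st q =>
        let currentSum := PySem.List.pyGetD numbers i 0 + PySem.List.pyGetD numbers j 0 +
          PySem.List.pyGetD numbers q 0
        -- min_sum starts as float('inf'): modelled by none (every int is below it)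
        match st.1 with
        | none => (some currentSum,
            [PySem.List.pyGetD numbers i 0, PySem.List.pyGetD numbers j 0, PySem.List.pyGetD numbers q 0])
        | some m =>
          if currentSum < m then
            (some currentSum,
              [PySem.List.pyGetD numbers i 0, PySem.List.pyGetD numbers j 0, PySem.List.pyGetD numbers q 0])
          else st) st) st)
    ((none : Option Int), ([] : List Int))).2

-- ===== PORT B =====
-- one loop iteration of Source B: update mq, then mp (using the new mq), then best (using the new mp)
def pvStepB (k : Int) (numbers : List Int)
    (st : Option Int × Option (Int × Int × Int) × Option (Int × List Int)) (i : Int) :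
    Option Int × Option (Int × Int × Int) × Option (Int × List Int) :=
  let v := PySem.List.pyGetD numbers (i + 2*k) 0
  let mq := match st.1 with
    | none => v
    | some m => if v ≤ m then v else m
  let jv := PySem.List.pyGetD numbers (i + k) 0
  let mp := match st.2.1 with
    | none => (jv + mq, jv, mq)
    | some p => if jv + mq ≤ p.1 then (jv + mq, jv, mq) else p
  let iv := PySem.List.pyGetD numbers i 0
  let best := match st.2.2 with
    | none => (iv + mp.1, [iv, mp.2.1, mp.2.2])
    | some b => if iv + mp.1 ≤ b.1 then (iv + mp.1, [iv, mp.2.1, mp.2.2]) else b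
  (some mq, some mp, some best)

def findMinSumOf3Nums_alt (n : Int) (k : Int) (numbers : List Int) : List Int :=
  if n - 2*k ≤ 0 then []
  else
    let st := (PySem.List.pyRange (n - 2*k - 1) (-1) (-1)).foldl (pvStepB k numbers)
      (none, none, none)
    match st.2.2 with
    | some b => b.2
    | none => []  -- unreachable: the loop runs at least once when n - 2*k > 0

-- ===== PRECONDITION & SPEC =====
-- Pre_ excludes exactly the inputs on which Python A raises IndexError: when the loops run
-- (2*k < n), every accessed index lies in [min(0,2k), max(n,n-2k)) and must be a valid
-- (possibly negative, wrapping) index of numbers.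
def Pre_findMinSumOf3Nums (n : Int) (k : Int) (numbers : List Int) : Prop :=
  2*k < n → (-(numbers.length : Int) ≤ 2*k ∧ n - 2*k ≤ (numbers.length : Int) ∧ n ≤ (numbers.length : Int))
instance (n : Int) (k : Int) (numbers : List Int) : Decidable (Pre_findMinSumOf3Nums n k numbers) := by
  unfold Pre_findMinSumOf3Nums; infer_instance

def pvWitness_findMinSumOf3Nums : Int × Int × List Int := (6, 1, [5, 1, 4, 1, 5, 9])

def Spec_findMinSumOf3Nums (n : Int) (k : Int) (numbers : List Int) (out : List Int) : Prop := out = findMinSumOf3Nums_alt n k numbers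
instance (n : Int) (k : Int) (numbers : List Int) (out : List Int) : Decidable (Spec_findMinSumOf3Nums n k numbers out) := by unfold Spec_findMinSumOf3Nums; infer_instance

-- ===== CLAIM (what is proved, stated in full; the proofs are below) =====
def Claim_equal_findMinSumOf3Nums : Prop := ∀ (n : Int) (k : Int) (numbers : List Int), Dom_findMinSumOf3Nums n k numbers → Pre_findMinSumOf3Nums n k numbers → Spec_findMinSumOf3Nums n k numbers (findMinSumOf3Nums n k numbers)

-- ===== LEMMAS AND PROOFS =====

-- leftmost minimum (by key) of a list, computed from the right with ties to the left
def pvLminR {α : Type} (key : α → Int) : List α → Option α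
  | [] => none
  | c :: l => match pvLminR key l with
    | none => some c
    | some a => if key c ≤ key a then some c else some a

def pvMergeR {α : Type} (key : α → Int) : Option α → Option α → Option α
  | none, y => y
  | some c, none => some c
  | some c, some a => some (if key c ≤ key a then c else a)

theorem pvLminR_cons {α : Type} (key : α → Int) (c : α) (l : List α) :
    pvLminR key (c :: l) = pvMergeR key (some c) (pvLminR key l) := by
  cases h : pvLminR key l <;> simp only [pvLminR, h, pvMergeR] <;> split_ifs <;> simp

theorem pvMergeR_assoc {α : Type} (key : α → Int) (x y z : Option α) :
    pvMergeR key (pvMergeR key x y) z = pvMergeR key x (pvMergeR key y z) := by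
  cases x <;> cases y <;> cases z <;> simp [pvMergeR] <;> split_ifs <;> simp_all <;> omega

theorem pvLminR_append {α : Type} (key : α → Int) (xs ys : List α) :
    pvLminR key (xs ++ ys) = pvMergeR key (pvLminR key xs) (pvLminR key ys) := by
  induction xs with
  | nil => simp [pvLminR, pvMergeR]
  | cons c l ih => simp only [List.cons_append, pvLminR_cons, ih, pvMergeR_assoc]

theorem pvLminR_map {α β : Type} (key1 : α → Int) (key2 : β → Int) (g : α → β)
    (h : ∀ a b : α, key2 (g a) ≤ key2 (g b) ↔ key1 a ≤ key1 b) (l : List α) :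
    pvLminR key2 (l.map g) = (pvLminR key1 l).map g := by
  induction l with
  | nil => simp [pvLminR]
  | cons c l ih =>
    rw [List.map_cons, pvLminR_cons, ih, pvLminR_cons]
    cases hl : pvLminR key1 l with
    | none => simp [pvMergeR]
    | some a => by_cases hc : key1 c ≤ key1 a <;> simp [pvMergeR, h c a, hc]

-- A's running state: strict-< update, i.e. leftmost minimum scanned from the left
def pvMergeL (x : Option (Int × List Int)) (c : Int × List Int) : Option (Int × List Int) :=
  match x with
  | none => some c
  | some a => if c.1 < a.1 then some c else some a

def pvMergeLO (x y : Option (Int × List Int)) : Option (Int × List Int) :=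
  match y with
  | none => x
  | some c => pvMergeL x c

theorem pvMergeLO_mergeR (a : Option (Int × List Int)) (c : Int × List Int)
    (r : Option (Int × List Int)) :
    pvMergeLO (pvMergeL a c) r = pvMergeLO a (pvMergeR Prod.fst (some c) r) := by
  cases a <;> cases r <;> simp [pvMergeL, pvMergeLO, pvMergeR] <;> split_ifs <;>
    simp_all <;> omega

theorem pvFoldl_mergeL (l : List (Int × List Int)) :
    ∀ acc, l.foldl pvMergeL acc = pvMergeLO acc (pvLminR Prod.fst l) := by
  induction l with
  | nil => intro acc; simp [pvLminR, pvMergeLO]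
  | cons c l ih => intro acc; rw [List.foldl_cons, ih, pvLminR_cons, pvMergeLO_mergeR]

-- A's state as a pair (min_sum, final_nums)
def pvEncode (x : Option (Int × List Int)) : Option Int × List Int :=
  match x with
  | none => (none, [])
  | some a => (some a.1, a.2)

def pvStepA (st : Option Int × List Int) (c : Int × List Int) : Option Int × List Int :=
  match st.1 with
  | none => (some c.1, c.2)
  | some m => if c.1 < m then (some c.1, c.2) else st

theorem pvStepA_encode (x : Option (Int × List Int)) (c : Int × List Int) :
    pvStepA (pvEncode x) c = pvEncode (pvMergeL x c) := by
  cases x <;> simp [pvStepA, pvEncode, pvMergeL] <;> split_ifs <;> simp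

theorem pvFoldl_stepA (l : List (Int × List Int)) :
    ∀ x, l.foldl pvStepA (pvEncode x) = pvEncode (l.foldl pvMergeL x) := by
  induction l with
  | nil => intro x; rfl
  | cons c l ih => intro x; rw [List.foldl_cons, List.foldl_cons, pvStepA_encode, ih]

-- candidate lists (windows as they shrink while B's loop variable i = s decreases)
def pvNum (numbers : List Int) (t : Int) : Int := PySem.List.pyGetD numbers t 0

def pvQ (n k : Int) (nums : List Int) (s : Int) : List Int :=
  (PySem.List.pyRange (s + 2*k) n 1).map (pvNum nums)

def pvP (n k : Int) (nums : List Int) (s : Int) : List (Int × Int × Int) :=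
  (PySem.List.pyRange (s + k) (n - k) 1).flatMap (fun j =>
    (PySem.List.pyRange (j + k) n 1).map (fun q =>
      (pvNum nums j + pvNum nums q, pvNum nums j, pvNum nums q)))

def pvT (n k : Int) (nums : List Int) (s : Int) : List (Int × List Int) :=
  (PySem.List.pyRange s (n - 2*k) 1).flatMap (fun i =>
    (PySem.List.pyRange (i + k) (n - k) 1).flatMap (fun j =>
      (PySem.List.pyRange (j + k) n 1).map (fun q =>
        (pvNum nums i + pvNum nums j + pvNum nums q,
         [pvNum nums i, pvNum nums j, pvNum nums q]))))

def pvInv (n k : Int) (nums : List Int) (s : Int) :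
    Option Int × Option (Int × Int × Int) × Option (Int × List Int) :=
  (pvLminR id (pvQ n k nums s), pvLminR Prod.fst (pvP n k nums s),
   pvLminR Prod.fst (pvT n k nums s))

theorem pvFoldl_flatMap {α β : Type} (g : α → List β) (f : γ → β → γ) (l : List α) :
    ∀ init : γ, (l.flatMap g).foldl f init = l.foldl (fun a x => (g x).foldl f a) init := by
  induction l with
  | nil => intro init; rfl
  | cons c l ih => intro init; simp [List.flatMap_cons, List.foldl_append, ih]

theorem pvMergeLO_none (y : Option (Int × List Int)) : pvMergeLO none y = y := by
  cases y <;> simp [pvMergeLO, pvMergeL]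

-- A = encoded leftmost minimum of the full candidate list
theorem pvA_eq (n k : Int) (nums : List Int) :
    findMinSumOf3Nums n k nums = (pvEncode (pvLminR Prod.fst (pvT n k nums 0))).2 := by
  unfold findMinSumOf3Nums
  have hbody : (fun (st : Option Int × List Int) (i : Int) =>
      (PySem.List.pyRange (i + k) (n - k) 1).foldl (fun st j =>
        (PySem.List.pyRange (j + k) n 1).foldl (fun st q =>
          let currentSum := PySem.List.pyGetD nums i 0 + PySem.List.pyGetD nums j 0 +
            PySem.List.pyGetD nums q 0
          match st.1 with
          | none => (some currentSum,
              [PySem.List.pyGetD nums i 0, PySem.List.pyGetD nums j 0, PySem.List.pyGetD nums q 0])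
          | some m =>
            if currentSum < m then
              (some currentSum,
                [PySem.List.pyGetD nums i 0, PySem.List.pyGetD nums j 0, PySem.List.pyGetD nums q 0])
            else st) st) st)
      = (fun (st : Option Int × List Int) (i : Int) =>
        ((PySem.List.pyRange (i + k) (n - k) 1).flatMap (fun j =>
          (PySem.List.pyRange (j + k) n 1).map (fun q =>
            (pvNum nums i + pvNum nums j + pvNum nums q,
             [pvNum nums i, pvNum nums j, pvNum nums q])))).foldl pvStepA st) := by
    funext st i
    rw [pvFoldl_flatMap]
    congr 1
    funext st j
    rw [List.foldl_map]
    rfl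
  rw [hbody, ← pvFoldl_flatMap,
    show ((none : Option Int), ([] : List Int)) = pvEncode none from rfl,
    pvFoldl_stepA, pvFoldl_mergeL, pvMergeLO_none]
  rfl

-- one iteration of B's loop moves the invariant from s+1 to s
theorem pvStepB_inv (n k : Int) (nums : List Int) (s : Int) (hs : s < n - 2*k) :
    pvStepB k nums (pvInv n k nums (s+1)) s = pvInv n k nums s := by
  have hq : pvLminR id (pvQ n k nums s)
      = pvMergeR id (some (pvNum nums (s + 2*k))) (pvLminR id (pvQ n k nums (s+1))) := by
    unfold pvQ
    rw [PySem.List.pyRange_one_cons (by omega : s + 2*k < n), List.map_cons, pvLminR_cons,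
      show s + 2*k + 1 = (s+1) + 2*k by ring]
  have hp : pvLminR Prod.fst (pvP n k nums s)
      = pvMergeR Prod.fst
          ((pvLminR id (pvQ n k nums s)).map
            (fun v => (pvNum nums (s+k) + v, pvNum nums (s+k), v)))
          (pvLminR Prod.fst (pvP n k nums (s+1))) := by
    unfold pvP
    rw [PySem.List.pyRange_one_cons (by omega : s + k < n - k), List.flatMap_cons,
      pvLminR_append, show s + k + 1 = (s+1) + k by ring]
    congr 1
    rw [← pvLminR_map id Prod.fst (fun v => (pvNum nums (s+k) + v, pvNum nums (s+k), v))
      (by intro a b; simp)]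
    unfold pvQ
    rw [List.map_map, show s + k + k = s + 2*k by ring]
    rfl
  have ht : pvLminR Prod.fst (pvT n k nums s)
      = pvMergeR Prod.fst
          ((pvLminR Prod.fst (pvP n k nums s)).map
            (fun p => (pvNum nums s + p.1, [pvNum nums s, p.2.1, p.2.2])))
          (pvLminR Prod.fst (pvT n k nums (s+1))) := by
    unfold pvT
    rw [PySem.List.pyRange_one_cons (by omega : s < n - 2*k), List.flatMap_cons,
      pvLminR_append]
    congr 1
    rw [← pvLminR_map Prod.fst Prod.fst
      (fun p : Int × Int × Int => (pvNum nums s + p.1, [pvNum nums s, p.2.1, p.2.2]))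
      (by intro a b; simp)]
    unfold pvP
    rw [List.map_flatMap]
    congr 1
    congr 1
    funext j
    rw [List.map_map]
    congr 1
    funext q
    simp [Int.add_assoc]
  show pvStepB k nums (pvInv n k nums (s+1)) s
      = (pvLminR id (pvQ n k nums s), pvLminR Prod.fst (pvP n k nums s),
         pvLminR Prod.fst (pvT n k nums s))
  rw [ht, hp, hq]
  unfold pvStepB pvInv pvNum
  cases hq1 : pvLminR id (pvQ n k nums (s+1)) <;>
    cases hp1 : pvLminR Prod.fst (pvP n k nums (s+1)) <;>
    cases ht1 : pvLminR Prod.fst (pvT n k nums (s+1)) <;>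
    simp [pvMergeR, hq1, hp1, ht1] <;> split_ifs <;> simp

theorem pvB_loop (n k : Int) (nums : List Int) :
    ∀ c : Nat, (c : Int) ≤ n - 2*k →
      (PySem.List.pyRange ((c : Int) - 1) (-1) (-1)).foldl (pvStepB k nums)
        (pvInv n k nums (c : Int)) = pvInv n k nums 0 := by
  intro c
  induction c with
  | zero =>
    intro _
    rw [PySem.List.pyRange_neg_one_eq_nil (by omega)]
    rfl
  | succ c ih =>
    intro hc
    have h1 : ((c + 1 : Nat) : Int) - 1 = (c : Int) := by push_cast; ring
    rw [h1, PySem.List.pyRange_neg_one_cons (by omega), List.foldl_cons]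
    have h2 : pvStepB k nums (pvInv n k nums ((c + 1 : Nat) : Int)) (c : Int)
        = pvInv n k nums (c : Int) := by
      have := pvStepB_inv n k nums (c : Int) (by push_cast at hc; omega)
      have h3 : ((c + 1 : Nat) : Int) = (c : Int) + 1 := by push_cast; ring
      rw [h3]; exact this
    rw [h2]
    exact ih (by push_cast at hc ⊢; omega)

theorem pvInv_top (n k : Int) (nums : List Int) :
    pvInv n k nums (n - 2*k) = (none, none, none) := by
  have hq : n - 2*k + 2*k = n := by ring
  have hp : n - 2*k + k = n - k := by ring
  unfold pvInv pvQ pvP pvT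
  rw [hq, hp]
  rw [PySem.List.pyRange_one_eq_nil (le_refl n), PySem.List.pyRange_one_eq_nil (le_refl (n-k)),
    PySem.List.pyRange_one_eq_nil (le_refl (n-2*k))]
  rfl

theorem pvMain (n k : Int) (nums : List Int) :
    findMinSumOf3Nums n k nums = findMinSumOf3Nums_alt n k nums := by
  rw [pvA_eq]
  unfold findMinSumOf3Nums_alt
  by_cases hM : n - 2*k ≤ 0
  · rw [if_pos hM]
    unfold pvT
    rw [PySem.List.pyRange_one_eq_nil hM]
    rfl
  · rw [if_neg hM]
    have hcast : ((n - 2*k).toNat : Int) = n - 2*k := by omega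
    have hloop := pvB_loop n k nums (n - 2*k).toNat (by omega)
    rw [hcast] at hloop
    rw [← pvInv_top n k nums, hloop]
    unfold pvInv pvEncode
    cases pvLminR Prod.fst (pvT n k nums 0) <;> rfl

-- ===== VERDICT (by name: the statement is the Claim_ definition above) =====
theorem findMinSumOf3Nums_spec : Claim_equal_findMinSumOf3Nums := by
  intro n k numbers _ _
  unfold Spec_findMinSumOf3Nums
  exact pvMain n k numbers
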